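-- pv_equiv track=rewrite | github.com/safe-wind/ITS_Python | Lezione13/esercizio10.py | charDuplicator
-- ===== SOURCE A (Python) =====
-- def charDuplicator(text:str) -> str:
--     new_text = ""
--
--     if len(text) == len(new_text)*2:
--         return new_text
--
--     first_letter = (text[0]*2).lower()
--
--     if first_letter:
--         new_text+=first_letter
--
--     return new_text + charDuplicator(text[1:])
-- ===== SOURCE B (Python) =====
-- def charDuplicator(text: str) -> str:
--     return ''.join(c * 2 for c in text.lower())
-- ===== Notes on version B (the rewrite author's own statement) =====
-- stated objective: faster
-- what changed: Replaced the recursive character-by-character string slicing/concatenation with a single pass that lowercases once and joins each doubled character.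
import Mathlib
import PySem

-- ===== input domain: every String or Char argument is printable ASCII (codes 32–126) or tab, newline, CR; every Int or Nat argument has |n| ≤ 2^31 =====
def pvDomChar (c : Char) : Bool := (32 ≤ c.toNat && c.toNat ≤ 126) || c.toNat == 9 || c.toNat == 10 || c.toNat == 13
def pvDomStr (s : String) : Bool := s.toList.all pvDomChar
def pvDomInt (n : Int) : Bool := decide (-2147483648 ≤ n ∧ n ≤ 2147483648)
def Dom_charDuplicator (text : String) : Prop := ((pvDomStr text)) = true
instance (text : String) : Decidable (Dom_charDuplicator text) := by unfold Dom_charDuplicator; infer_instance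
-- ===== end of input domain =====

-- B: single pass — lowercase once and double each character (A is recursive with slicing; same return value).
-- ===== PORT A =====
-- A's recursion on text, transliterated over the code-point list (text[1:] = the tail, text[0] = the head;
-- the `len(text) == len("")*2` base test is `text = []`).
def charDuplicatorGo : List Char → List Char
  | [] => []                                   -- if len(text) == len(new_text)*2: return new_text (= "")
  | c :: rest =>
      let firstLetter := PySem.Chars.lower [c, c]      -- (text[0]*2).lower()
      let newText := if firstLetter ≠ [] then firstLetter else []   -- if first_letter: new_text += first_letter
      newText ++ charDuplicatorGo rest         -- new_text + charDuplicator(text[1:])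

def charDuplicator (text : String) : String := String.mk (charDuplicatorGo text.toList)

-- ===== PORT B =====
def charDuplicator_alt (text : String) : String :=
  String.mk ((PySem.Str.lower text).toList.flatMap (fun c => [c, c]))

-- ===== PRECONDITION & SPEC =====
def Spec_charDuplicator (text : String) (out : String) : Prop := out = charDuplicator_alt text
instance (text : String) (out : String) : Decidable (Spec_charDuplicator text out) := by unfold Spec_charDuplicator; infer_instance

-- ===== CLAIM (what is proved, stated in full; the proofs are below) =====
def Claim_equal_charDuplicator : Prop := ∀ (text : String), Dom_charDuplicator text → Spec_charDuplicator text (charDuplicator text)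

-- ===== LEMMAS AND PROOFS =====

-- ===== VERDICT (by name: the statement is the Claim_ definition above) =====
lemma charDuplicatorGo_eq (l : List Char) :
    charDuplicatorGo l = (PySem.Chars.lower l).flatMap (fun c => [c, c]) := by
  induction l with
  | nil => simp [charDuplicatorGo, PySem.Chars.lower]
  | cons c rest ih => simp [charDuplicatorGo, PySem.Chars.lower, ih]

-- ===== VERDICT (by name: the statement is the Claim_ definition above) =====
theorem charDuplicator_spec : Claim_equal_charDuplicator := by
  intro text _
  unfold Spec_charDuplicator charDuplicator charDuplicator_alt
  rw [charDuplicatorGo_eq, PySem.Str.toList_lower]
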